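-- pv_equiv track=rewrite | github.com/PluxLight/Programmers-Solution | 22nhn/01.py | solution
-- ===== SOURCE A (Python) =====
-- def problematic_deck_between_players(first_player: list, second_player: list) -> bool:
--     temp = []
--     temp.extend(first_player)
--     temp.extend(second_player)
--     return len(set(temp)) < len(temp)
--
-- def problematic_deck_between_rounds(last_round: list, this_round: list) -> bool:
--     return len(set(last_round) & set(this_round)) > 1
--
-- def solution(cards1, cards2):
--     answer = 0
--     last_rounds = ([], [])
--     for first_player, second_player in zip(cards1, cards2):
--         if (problematic_deck_between_players(first_player, second_player) or
--             problematic_deck_between_rounds(last_rounds[0], first_player) or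
--                 problematic_deck_between_rounds(last_rounds[1], second_player)):
--             answer += 1
--         last_rounds = first_player, second_player
--
--     return answer
-- ===== SOURCE B (Python) =====
-- def adj_dups(t):
--     # number of adjacent equal pairs in sorted(t) = len(t) - number of distinct values
--     s = sorted(t)
--     return sum(1 for x, y in zip(s, s[1:]) if x == y)
--
-- def dedup(t):
--     # sorted distinct values of t: keep each element of sorted(t) that differs
--     # from its successor, plus the last element
--     s = sorted(t)
--     return [x for x, y in zip(s, s[1:]) if x != y] + s[-1:]
--
-- def solution(cards1, cards2):
--     d1 = [dedup(x) for x in cards1]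
--     d2 = [dedup(x) for x in cards2]
--     within = [adj_dups(a + b) > 0 for a, b in zip(cards1, cards2)]
--     across1 = [False] + [adj_dups(p + c) > 1 for p, c in zip(d1, d1[1:])]
--     across2 = [False] + [adj_dups(p + c) > 1 for p, c in zip(d2, d2[1:])]
--     return sum(1 for w, x, y in zip(within, across1, across2) if w or x or y)
-- ===== Notes on version B (the rewrite author's own statement) =====
-- stated objective: alternative
-- what changed: Replaces A's hash-set cardinality tests (len(set(temp))<len(temp), len(set&set)>1) and rolling-prev loop with a sort-and-scan method: every check becomes counting adjacent equal pairs of a sorted concatenation (within-round duplicates = at least one adjacent equal pair; cross-round shared cards = adjacent equal pairs of the concatenated per-round sorted deduplicated decks), combined by zipping per-round flag lists with their shifted selves.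
import Mathlib
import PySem

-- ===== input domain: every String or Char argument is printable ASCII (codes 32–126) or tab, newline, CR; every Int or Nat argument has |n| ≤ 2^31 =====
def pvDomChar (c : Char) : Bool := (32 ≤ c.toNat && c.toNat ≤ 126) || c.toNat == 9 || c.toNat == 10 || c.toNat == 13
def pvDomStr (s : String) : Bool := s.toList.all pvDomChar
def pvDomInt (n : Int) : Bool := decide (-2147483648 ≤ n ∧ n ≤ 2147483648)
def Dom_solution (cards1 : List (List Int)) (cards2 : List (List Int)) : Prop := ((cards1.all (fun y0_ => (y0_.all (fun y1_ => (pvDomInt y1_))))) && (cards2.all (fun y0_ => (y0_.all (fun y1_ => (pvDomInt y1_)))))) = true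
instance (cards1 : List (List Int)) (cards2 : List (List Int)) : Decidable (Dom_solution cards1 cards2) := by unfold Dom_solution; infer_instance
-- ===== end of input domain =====

-- B replaces A's hash-set cardinality tests and rolling-prev loop with sort-and-scan
-- (counting adjacent equal pairs of sorted concatenations) over zipped per-round flag
-- lists (alternative algorithm; similar cost).

-- ===== PORT A =====
def problematic_deck_between_players (first_player : List Int) (second_player : List Int) : Bool :=
  -- temp = []; temp.extend(first_player); temp.extend(second_player)
  let temp : List Int := [] ++ first_player ++ second_player
  decide ((PySem.Set.ofList temp).length < temp.length)

def problematic_deck_between_rounds (last_round : List Int) (this_round : List Int) : Bool :=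
  decide (1 < (PySem.Set.inter (PySem.Set.ofList last_round) (PySem.Set.ofList this_round)).length)

-- the 'for first_player, second_player in zip(...)' loop, carrying (answer, last_rounds)
def solutionLoop : List (List Int × List Int) → Int → (List Int × List Int) → Int
  | [], answer, _ => answer
  | r :: rs, answer, last_rounds =>
      solutionLoop rs
        (if problematic_deck_between_players r.1 r.2 ||
            problematic_deck_between_rounds last_rounds.1 r.1 ||
            problematic_deck_between_rounds last_rounds.2 r.2
         then answer + 1 else answer)
        r

def solution (cards1 : List (List Int)) (cards2 : List (List Int)) : Int :=
  solutionLoop (cards1.zip cards2) 0 ([], [])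

-- ===== PORT B =====
-- adj_dups(t): sum(1 for x, y in zip(s, s[1:]) if x == y) with s = sorted(t)
def adjDups (t : List Int) : Nat :=
  let s := PySem.List.sorted t (fun v => v) false
  ((s.zip s.tail).filter (fun p => p.1 == p.2)).length

-- dedup(t): [x for x, y in zip(s, s[1:]) if x != y] + s[-1:] with s = sorted(t)
def dedupB (t : List Int) : List Int :=
  let s := PySem.List.sorted t (fun v => v) false
  ((s.zip s.tail).filter (fun p => !(p.1 == p.2))).map (·.1) ++ PySem.List.slice s (some (-1)) none

def solution_alt (cards1 : List (List Int)) (cards2 : List (List Int)) : Int :=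
  let d1 := cards1.map dedupB
  let d2 := cards2.map dedupB
  let within := (cards1.zip cards2).map (fun p => decide (0 < adjDups (p.1 ++ p.2)))
  let across1 := false :: (d1.zip d1.tail).map (fun p => decide (1 < adjDups (p.1 ++ p.2)))
  let across2 := false :: (d2.zip d2.tail).map (fun p => decide (1 < adjDups (p.1 ++ p.2)))
  ((((within.zip across1).zip across2).filter (fun t => t.1.1 || t.1.2 || t.2)).length : Int)

-- ===== PRECONDITION & SPEC =====
def Spec_solution (cards1 : List (List Int)) (cards2 : List (List Int)) (out : Int) : Prop := out = solution_alt cards1 cards2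
instance (cards1 : List (List Int)) (cards2 : List (List Int)) (out : Int) : Decidable (Spec_solution cards1 cards2 out) := by unfold Spec_solution; infer_instance

-- ===== CLAIM (what is proved, stated in full; the proofs are below) =====
def Claim_equal_solution : Prop := ∀ (cards1 : List (List Int)) (cards2 : List (List Int)), Dom_solution cards1 cards2 → Spec_solution cards1 cards2 (solution cards1 cards2)

-- ===== LEMMAS AND PROOFS =====

-- two nodup lists with the same members have the same length
lemma length_eq_of_nodup_mem {l l' : List Int} (h1 : l.Nodup) (h2 : l'.Nodup)
    (h : ∀ x, x ∈ l ↔ x ∈ l') : l.length = l'.length :=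
  ((List.perm_ext_iff_of_nodup h1 h2).mpr h).length_eq

lemma ofList_length_congr {t t' : List Int} (h : ∀ x, x ∈ t ↔ x ∈ t') :
    (PySem.Set.ofList t).length = (PySem.Set.ofList t').length :=
  length_eq_of_nodup_mem (PySem.Set.nodup_ofList _) (PySem.Set.nodup_ofList _)
    (by intro x; simp [PySem.Set.mem_ofList, h x])

-- the keep-last core of dedupB, on an arbitrary list
def klCore (s : List Int) : List Int :=
  ((s.zip s.tail).filter (fun p => !(p.1 == p.2))).map (·.1) ++ s.drop (s.length - 1)

lemma dedupB_eq_klCore (t : List Int) :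
    dedupB t = klCore (PySem.List.sorted t (fun v => v) false) := by
  simp [dedupB, klCore, PySem.List.slice_from_neg_one]

lemma klCore_cons₂ (a b : Int) (t : List Int) :
    klCore (a :: b :: t) = (if a = b then ([] : List Int) else [a]) ++ klCore (b :: t) := by
  by_cases h : a = b <;> simp [klCore, h, List.length_cons]

lemma klCore_mem (s : List Int) (hs : s.Pairwise (· ≤ ·)) :
    ∀ x, x ∈ klCore s ↔ x ∈ s := by
  induction s with
  | nil => intro x; simp [klCore]
  | cons a t ih =>
      cases t with
      | nil => intro x; simp [klCore]
      | cons b t' =>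
          intro x
          rw [klCore_cons₂]
          have h2 := ih (List.pairwise_cons.mp hs).2
          by_cases h : a = b
          · subst h
            simp [h2 x]
          · simp [h, h2 x]

lemma klCore_lt (s : List Int) (hs : s.Pairwise (· ≤ ·)) :
    (klCore s).Pairwise (· < ·) := by
  induction s with
  | nil => simp [klCore]
  | cons a t ih =>
      cases t with
      | nil => simp [klCore]
      | cons b t' =>
          rw [klCore_cons₂]
          have hs' := (List.pairwise_cons.mp hs).2
          have hrest := ih hs'
          by_cases h : a = b
          · simpa [h] using hrest
          · have hab : a ≤ b := (List.pairwise_cons.mp hs).1 b (by simp)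
            have hbt : ∀ y ∈ t', b ≤ y := fun y hy => (List.pairwise_cons.mp hs').1 y hy
            simp [h]
            constructor
            · intro y hy
              have : y ∈ b :: t' := (klCore_mem _ hs' y).mp hy
              rcases List.mem_cons.mp this with rfl | hyt
              · exact lt_of_le_of_ne hab h
              · exact lt_of_lt_of_le (lt_of_le_of_ne hab h) (hbt y hyt)
            · exact hrest

lemma dedupB_nodup (t : List Int) : (dedupB t).Nodup := by
  rw [dedupB_eq_klCore]
  exact (klCore_lt _ (PySem.List.sorted_pairwise t (fun v => v))).imp (fun h => ne_of_lt h)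

lemma dedupB_mem (t : List Int) : ∀ x, x ∈ dedupB t ↔ x ∈ t := by
  intro x
  rw [dedupB_eq_klCore, klCore_mem _ (PySem.List.sorted_pairwise t (fun v => v)),
    PySem.List.mem_sorted]

lemma discard_of_not_mem (s : List Int) (a : Int) (h : a ∉ s) :
    PySem.Set.discard s a = s := by
  unfold PySem.Set.discard
  apply List.filter_eq_self.mpr
  intro y hy
  simp
  exact fun hya => h (hya ▸ hy)

lemma discard_length_of_mem (s : List Int) (a : Int) (hnd : s.Nodup) (h : a ∈ s) :
    (PySem.Set.discard s a).length + 1 = s.length := by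
  unfold PySem.Set.discard
  induction s with
  | nil => simp at h
  | cons x t ih =>
      rcases List.mem_cons.mp h with rfl | hat
      · have hnt : a ∉ t := (List.nodup_cons.mp hnd).1
        have hdt := discard_of_not_mem t a hnt
        unfold PySem.Set.discard at hdt
        simp [hdt]
      · have hxa : ¬ (x == a) := by
          simp
          rintro rfl
          exact (List.nodup_cons.mp hnd).1 hat
        simp [List.filter, hxa]
        have := ih (List.nodup_cons.mp hnd).2 hat
        omega

-- MAIN counting lemma: on a sorted list, adjacent-equal pairs + distinct values = length
lemma adj_count (s : List Int) (hs : s.Pairwise (· ≤ ·)) :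
    ((s.zip s.tail).filter (fun p => p.1 == p.2)).length + (PySem.Set.ofList s).length
      = s.length := by
  induction s with
  | nil => simp
  | cons a t ih =>
      cases t with
      | nil => simp [PySem.Set.ofList]
      | cons b t' =>
          have hs' := (List.pairwise_cons.mp hs).2
          have IH := ih hs'
          rw [PySem.Set.ofList_cons]
          by_cases h : a = b
          · subst h
            have hmem : a ∈ PySem.Set.ofList (a :: t') := by
              simp [PySem.Set.mem_ofList]
            have := discard_length_of_mem _ a (PySem.Set.nodup_ofList _) hmem
            simp only [List.zip_cons_cons, List.tail_cons, List.filter_cons] at *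
            simp at *
            omega
          · have hnm : a ∉ (b :: t') := by
              intro hmem
              rcases List.mem_cons.mp hmem with rfl | hat
              · exact h rfl
              · have hab : a ≤ b := (List.pairwise_cons.mp hs).1 b (by simp)
                have hba : b ≤ a := (List.pairwise_cons.mp hs').1 a hat
                exact h (le_antisymm hab hba)
            have hd := discard_of_not_mem (PySem.Set.ofList (b :: t')) a
              (by simpa [PySem.Set.mem_ofList] using hnm)
            simp only [List.zip_cons_cons, List.tail_cons, List.filter_cons] at *
            simp [h, hd] at *
            omega

lemma adjDups_add_ofList (t : List Int) :
    adjDups t + (PySem.Set.ofList t).length = t.length := by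
  have h := adj_count (PySem.List.sorted t (fun v => v) false)
    (PySem.List.sorted_pairwise t (fun v => v))
  unfold adjDups
  have hm : ∀ x, x ∈ PySem.List.sorted t (fun v => v) false ↔ x ∈ t := by
    intro x; exact PySem.List.mem_sorted t (fun v => v) false x
  rw [ofList_length_congr hm] at h
  rw [h]
  exact PySem.List.length_sorted t (fun v => v) false

lemma within_eq (a b : List Int) :
    decide (0 < adjDups (a ++ b)) = problematic_deck_between_players a b := by
  unfold problematic_deck_between_players
  have h := adjDups_add_ofList (a ++ b)
  simp only [List.nil_append]
  rw [decide_eq_decide]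
  omega

lemma adjDups_append_nodup (u v : List Int) (hu : u.Nodup) (hv : v.Nodup) :
    adjDups (u ++ v) = (v.filter (fun x => decide (x ∈ u))).length := by
  have h := adjDups_add_ofList (u ++ v)
  rw [PySem.Set.ofList_append, PySem.Set.ofList_eq_self_of_nodup u hu,
    PySem.Set.update_eq_append_filter, PySem.Set.ofList_eq_self_of_nodup v hv] at h
  simp only [List.length_append] at h
  have hsplit : (v.filter (fun x => decide (x ∈ u))).length
      + (v.filter (fun y => !(PySem.Set.contains u y))).length = v.length := by
    have hc : ∀ y ∈ v, (fun x => decide (x ∈ u)) y = PySem.Set.contains u y := by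
      intro y _; simp
    rw [List.filter_congr hc]
    have h2 := List.length_eq_length_filter_add (l := v) (PySem.Set.contains u)
    omega
  omega

lemma adjDups_of_nodup (v : List Int) (hv : v.Nodup) : adjDups v = 0 := by
  have h := adjDups_add_ofList v
  rw [PySem.Set.ofList_eq_self_of_nodup v hv] at h
  omega

lemma across_eq (p c : List Int) :
    decide (1 < adjDups (dedupB p ++ dedupB c)) = problematic_deck_between_rounds p c := by
  unfold problematic_deck_between_rounds
  rw [adjDups_append_nodup _ _ (dedupB_nodup p) (dedupB_nodup c)]
  have hlen : ((dedupB c).filter (fun x => decide (x ∈ dedupB p))).length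
      = (PySem.Set.inter (PySem.Set.ofList p) (PySem.Set.ofList c)).length := by
    apply length_eq_of_nodup_mem
    · exact (dedupB_nodup c).filter _
    · exact PySem.Set.nodup_inter _ _ (PySem.Set.nodup_ofList _)
    · intro x
      simp [List.mem_filter, PySem.Set.mem_inter, PySem.Set.mem_ofList, dedupB_mem]
      tauto
  rw [hlen]

lemma head_false (x : List Int) :
    decide (1 < adjDups ([] ++ dedupB x)) = false := by
  simp [adjDups_of_nodup _ (dedupB_nodup x)]

-- A's per-round condition with the previous round threaded structurally
def gCount : (List Int × List Int) → List (List Int × List Int) → Nat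
  | _, [] => 0
  | prev, r :: rs =>
      (if problematic_deck_between_players r.1 r.2 ||
          problematic_deck_between_rounds prev.1 r.1 ||
          problematic_deck_between_rounds prev.2 r.2
       then 1 else 0) + gCount r rs

lemma loop_eq_gCount (zs : List (List Int × List Int)) (acc : Int) (prev : List Int × List Int) :
    solutionLoop zs acc prev = acc + (gCount prev zs : Int) := by
  induction zs generalizing acc prev with
  | nil => simp [solutionLoop, gCount]
  | cons r rs ih =>
      simp only [solutionLoop, gCount, ih]
      split_ifs <;> push_cast <;> ring

-- B's flag-list count with the previous (already deduplicated) decks made explicit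
def zcount (pa pb : List Int) (c1 c2 : List (List Int)) : Nat :=
  (((((c1.zip c2).map (fun p => decide (0 < adjDups (p.1 ++ p.2)))).zip
      (((pa :: c1.map dedupB).zip (c1.map dedupB)).map (fun p => decide (1 < adjDups (p.1 ++ p.2))))).zip
      (((pb :: c2.map dedupB).zip (c2.map dedupB)).map (fun p => decide (1 < adjDups (p.1 ++ p.2))))).filter
    (fun t => t.1.1 || t.1.2 || t.2)).length

lemma zcount_eq_gCount (c1 c2 : List (List Int)) (p1 p2 : List Int) :
    zcount (dedupB p1) (dedupB p2) c1 c2 = gCount (p1, p2) (c1.zip c2) := by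
  induction c1 generalizing c2 p1 p2 with
  | nil => simp [zcount, gCount]
  | cons a as ih =>
      cases c2 with
      | nil => simp [zcount, gCount]
      | cons b bs =>
          simp only [zcount, gCount, List.map_cons, List.zip_cons_cons, List.filter_cons]
          rw [within_eq, across_eq, across_eq]
          have ihh := ih bs a b
          simp only [zcount] at ihh
          split_ifs with h
          · simp only [List.length_cons]; rw [ihh]; omega
          · rw [ihh]; omega

lemma alt_eq_zcount (c1 c2 : List (List Int)) :
    solution_alt c1 c2 = (zcount (dedupB []) (dedupB []) c1 c2 : Int) := by
  cases c1 with
  | nil => simp [solution_alt, zcount]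
  | cons a as =>
      cases c2 with
      | nil => simp [solution_alt, zcount]
      | cons b bs =>
          have h0 : dedupB ([] : List Int) = [] := rfl
          simp only [solution_alt, zcount, List.map_cons, List.tail_cons, List.zip_cons_cons, h0]
          rw [head_false a, head_false b]

-- ===== VERDICT (by name: the statement is the Claim_ definition above) =====
theorem solution_spec : Claim_equal_solution := by
  intro cards1 cards2 _
  unfold Spec_solution solution
  rw [loop_eq_gCount, alt_eq_zcount, zcount_eq_gCount]
  simp
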